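-- pv_equiv track=rewrite | github.com/ianwright27/torrent-browser-terminal | text_filter/textOperations.py | textFilter
-- ===== SOURCE A (Python) =====
-- def textFilter(str_):
-- 	string = ""
-- 	for ch in str_:
-- 		if ch == "<":
-- 			string += "a"
-- 		elif ch == ">":
-- 			string += "b"
-- 		elif ch == "/":
-- 			string += "c"
-- 		else:
-- 			string += ch
-- 	new_string = string[string.find('S'):string.find(', ULed')]
-- 	return new_string
-- ===== SOURCE B (Python) =====
-- _TR = str.maketrans('<>/', 'abc')
--
-- def textFilter(str_):
--     start = str_.find('S')
--     end = str_.find(', ULed')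
--     return str_[start:end].translate(_TR)
-- ===== Notes on version B (the rewrite author's own statement) =====
-- stated objective: faster
-- what changed: B computes the slice bounds with find on the original string (the replaced chars never occur in the search tokens, so indices are unchanged), slices first, and applies the 1-to-1 translation only to the extracted window via a precomputed str.translate table, instead of rebuilding the whole string char by char with += and then slicing.
import Mathlib
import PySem

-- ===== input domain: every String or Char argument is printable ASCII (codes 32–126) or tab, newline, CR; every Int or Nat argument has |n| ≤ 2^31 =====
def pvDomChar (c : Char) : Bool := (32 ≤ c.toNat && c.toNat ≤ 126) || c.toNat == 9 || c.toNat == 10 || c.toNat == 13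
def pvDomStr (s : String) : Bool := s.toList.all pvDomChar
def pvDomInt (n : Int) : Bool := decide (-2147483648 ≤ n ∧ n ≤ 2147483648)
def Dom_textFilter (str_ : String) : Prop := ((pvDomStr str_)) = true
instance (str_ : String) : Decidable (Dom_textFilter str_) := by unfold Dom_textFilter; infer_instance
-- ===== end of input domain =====

-- B slices the window between find('S') and find(', ULed') out of the ORIGINAL string first
-- (the replaced chars never occur in the search tokens), then translates only that window.

-- ===== PORT A =====
def textFilter (str_ : String) : String :=
  let string : String := str_.toList.foldl
    (fun acc ch =>
      if ch = '<' then acc ++ "a"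
      else if ch = '>' then acc ++ "b"
      else if ch = '/' then acc ++ "c"
      else acc.push ch) ""
  PySem.Str.slice string (some (PySem.Str.find string "S")) (some (PySem.Str.find string ", ULed"))

-- ===== PORT B =====
-- the translation table '<'→'a', '>'→'b', '/'→'c' (str.maketrans in Source B)
def trChar (c : Char) : Char :=
  if c = '<' then 'a' else if c = '>' then 'b' else if c = '/' then 'c' else c

def textFilter_alt (str_ : String) : String :=
  let start := PySem.Str.find str_ "S"
  let stop := PySem.Str.find str_ ", ULed"
  String.ofList ((PySem.Str.slice str_ (some start) (some stop)).toList.map trChar)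

-- ===== PRECONDITION & SPEC =====
def Spec_textFilter (str_ : String) (out : String) : Prop := out = textFilter_alt str_
instance (str_ : String) (out : String) : Decidable (Spec_textFilter str_ out) := by unfold Spec_textFilter; infer_instance

-- ===== CLAIM (what is proved, stated in full; the proofs are below) =====
def Claim_equal_textFilter : Prop := ∀ (str_ : String), Dom_textFilter str_ → Spec_textFilter str_ (textFilter str_)

-- ===== LEMMAS AND PROOFS =====

-- trChar fixes every char that is neither replaced nor produced by the replacement
theorem trChar_fix {c : Char} (h : c ∉ (['a','b','c','<','>','/'] : List Char)) :
    ∀ x, trChar x = c ↔ x = c := by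
  intro x; unfold trChar; split_ifs with h1 h2 h3 <;> simp_all [eq_comm]

theorem tokS : ∀ c ∈ ("S".toList), c ∉ (['a','b','c','<','>','/'] : List Char) := by
  have h : "S".toList = ['S'] := by simp
  rw [h]; intro c hc; fin_cases hc; decide

theorem tokU : ∀ c ∈ (", ULed".toList), c ∉ (['a','b','c','<','>','/'] : List Char) := by
  have h : ", ULed".toList = [',', ' ', 'U', 'L', 'e', 'd'] := by simp
  rw [h]; intro c hc; fin_cases hc <;> decide

-- the A-side loop builds exactly the character-wise translation of the input
theorem foldlA_toList (l : List Char) (acc : String) :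
    (l.foldl (fun acc ch =>
      if ch = '<' then acc ++ "a"
      else if ch = '>' then acc ++ "b"
      else if ch = '/' then acc ++ "c"
      else acc.push ch) acc).toList = acc.toList ++ l.map trChar := by
  induction l generalizing acc with
  | nil => simp
  | cons c t ih =>
    simp only [List.foldl_cons, List.map_cons, ih]
    by_cases h1 : c = '<' <;> by_cases h2 : c = '>' <;> by_cases h3 : c = '/' <;>
      simp_all [trChar]

theorem prefix_map_iff (sub : List Char) (l : List Char)
    (hf : ∀ c ∈ sub, ∀ x, trChar x = c ↔ x = c) :
    sub <+: l.map trChar ↔ sub <+: l := by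
  induction sub generalizing l with
  | nil => simp
  | cons a s ih =>
    cases l with
    | nil => simp
    | cons b t =>
      simp only [List.map_cons, List.cons_prefix_cons]
      constructor
      · rintro ⟨h1, hp⟩
        have hb : b = a := (hf a (by simp) b).mp h1.symm
        exact ⟨hb.symm, (ih t (fun c hc x => hf c (by simp [hc]) x)).mp hp⟩
      · rintro ⟨h1, hp⟩
        have : trChar b = a := (hf a (by simp) b).mpr h1.symm
        exact ⟨this.symm, (ih t (fun c hc x => hf c (by simp [hc]) x)).mpr hp⟩

-- find is unchanged by the translation when the token's chars are all fixed points not in its image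
theorem find_map_eq (l : List Char) (sub : List Char)
    (hf : ∀ c ∈ sub, ∀ x, trChar x = c ↔ x = c) :
    PySem.Chars.find (l.map trChar) sub = PySem.Chars.find l sub := by
  have hpref : ∀ j : Nat, (sub <+: (l.map trChar).drop j ↔ sub <+: l.drop j) := by
    intro j; rw [← List.map_drop]; exact prefix_map_iff sub (l.drop j) hf
  by_cases h : PySem.Chars.find l sub = -1
  · have hni : ¬ sub <:+: l := (PySem.Chars.find_eq_neg_one_iff _ _).mp h
    rw [h, PySem.Chars.find_eq_neg_one_iff]
    intro hinf
    obtain ⟨j, hj⟩ := (PySem.Chars.exists_prefix_drop_iff_isIn sub (l.map trChar)).mpr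
      ((PySem.Chars.isIn_iff_infix _ _).mpr hinf)
    exact hni ((PySem.Chars.isIn_iff_infix _ _).mp
      ((PySem.Chars.exists_prefix_drop_iff_isIn sub l).mp ⟨j, (hpref j).mp hj⟩))
  · have h' : PySem.Chars.find (l.map trChar) sub ≠ -1 := by
      rw [PySem.Chars.find_ne_neg_one_iff]
      obtain ⟨j, hj⟩ := (PySem.Chars.exists_prefix_drop_iff_isIn sub l).mpr
        ((PySem.Chars.isIn_iff_infix _ _).mpr ((PySem.Chars.find_ne_neg_one_iff _ _).mp h))
      exact (PySem.Chars.isIn_iff_infix _ _).mp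
        ((PySem.Chars.exists_prefix_drop_iff_isIn sub (l.map trChar)).mp ⟨j, (hpref j).mpr hj⟩)
    have hz : PySem.Chars.findFrom l sub ((0 : Nat) : Int) none = PySem.Chars.find l sub := by
      simp
    have hz' : PySem.Chars.findFrom (l.map trChar) sub ((0 : Nat) : Int) none
        = PySem.Chars.find (l.map trChar) sub := by simp
    obtain ⟨hle1, hp1, hmin1⟩ :=
      PySem.Chars.findFrom_natCast_spec l sub 0 (Nat.zero_le _) (by rw [hz]; exact h)
    obtain ⟨hle2, hp2, hmin2⟩ :=
      PySem.Chars.findFrom_natCast_spec (l.map trChar) sub 0 (Nat.zero_le _) (by rw [hz']; exact h')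
    rw [hz] at hle1 hp1 hmin1
    rw [hz'] at hle2 hp2 hmin2
    set i := PySem.Chars.find l sub with hi
    set i' := PySem.Chars.find (l.map trChar) sub with hi'
    have h12 : ¬ (i.toNat < i'.toNat) := fun hlt =>
      hmin2 i.toNat (Nat.zero_le _) hlt ((hpref i.toNat).mpr hp1)
    have h21 : ¬ (i'.toNat < i.toNat) := fun hlt =>
      hmin1 i'.toNat (Nat.zero_le _) hlt ((hpref i'.toNat).mp hp2)
    simp only [Nat.cast_zero] at hle1 hle2
    omega

-- slicing commutes with the char-wise translation (the bounds only read the length)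
theorem slice_map (l : List Char) (a b : Int) :
    PySem.List.slice (l.map trChar) (some a) (some b)
      = (PySem.List.slice l (some a) (some b)).map trChar := by
  simp [PySem.List.slice, PySem.List.clampIdx, List.map_drop, List.map_take]

-- ===== VERDICT (by name: the statement is the Claim_ definition above) =====
theorem textFilter_spec : Claim_equal_textFilter := by
  intro str_ _
  unfold Spec_textFilter textFilter textFilter_alt
  apply String.toList_inj.mp
  have hfold : (str_.toList.foldl (fun acc ch =>
      if ch = '<' then acc ++ "a"
      else if ch = '>' then acc ++ "b"
      else if ch = '/' then acc ++ "c"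
      else acc.push ch) "").toList = str_.toList.map trChar := by
    simpa using foldlA_toList str_.toList ""
  have hS := fun c hc x => trChar_fix (tokS c hc) x
  have hU := fun c hc x => trChar_fix (tokU c hc) x
  simp only [PySem.Str.slice, PySem.Str.find_eq, PySem.Chars.slice_eq_listSlice,
    String.toList_ofList, hfold, find_map_eq _ _ hS, find_map_eq _ _ hU, slice_map]
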